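-- pv_equiv track=rewrite | github.com/pesho-t/advent_of_code_2021 | 07/solution.py | part_one
-- ===== SOURCE A (Python) =====
-- from typing import List
--
-- def part_one(positions: List[int]) -> int:
--     """
--     As the cost of each move is constant, the alignment position
--     is the median of the set
--     """
--     positions.sort()
--
--     if len(positions) % 2 == 1:
--         align_to = positions[int((len(positions) - 1)/2)]
--     else:
--         # If there isn't an absolute middle, pick the middle two numbers and choose
--         # the one which is the furthest from the end of the list on its side.
--         # I.e. [1, 2, 3, 10] -> middle = 2, 3 -> pick 3 as 10 - 3 > 2 - 1
--         med_high = positions[int(len(positions)/2)]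
--         med_low = positions[int(len(positions)/2) - 1]
--
--         if med_low - positions[0] > positions[len(positions)-1] - med_high:
--             align_to = med_low
--         else:
--             align_to = med_high
--
--     fuel_used = 0
--
--     for pos in positions:
--         fuel_used += abs(align_to - pos)
--
--     return fuel_used
-- ===== SOURCE B (Python) =====
-- def part_one(positions):
--     # Pairing identity: min_m sum|x-m| over sorted s equals sum of gaps between
--     # outer pairs; no median selection needed. (Does not mutate the argument,
--     # unlike A which sorts it in place; returns 0 on [] where A raises.)
--     s = sorted(positions)
--     n = len(s)
--     return sum(s[n - 1 - i] - s[i] for i in range(n // 2))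
-- ===== Notes on version B (the rewrite author's own statement) =====
-- stated objective: alternative
-- what changed: Instead of selecting a median element (with A's even-length tie rule) and summing absolute deviations over the whole list, B sorts once and sums the pairwise gaps s[n-1-i]-s[i] over the first half of the sorted list, which equals the minimal L1 cost by the pairing identity.
import Mathlib
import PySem

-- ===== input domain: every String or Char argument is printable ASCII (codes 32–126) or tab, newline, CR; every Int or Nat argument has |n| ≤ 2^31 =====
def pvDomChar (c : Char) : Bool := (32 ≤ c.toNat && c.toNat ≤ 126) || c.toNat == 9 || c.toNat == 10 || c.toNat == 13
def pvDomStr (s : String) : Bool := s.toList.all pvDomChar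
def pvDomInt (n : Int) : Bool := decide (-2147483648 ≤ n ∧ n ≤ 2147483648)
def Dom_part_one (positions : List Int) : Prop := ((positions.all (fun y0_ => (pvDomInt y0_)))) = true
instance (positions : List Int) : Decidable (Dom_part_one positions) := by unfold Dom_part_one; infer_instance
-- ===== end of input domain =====

-- B replaces A's median selection + full abs-deviation pass by the pairing identity
-- Σ_{i<n/2} (s[n-1-i]-s[i]) over the sorted list (objective: alternative, same O(n log n)).
-- Equivalence is about the RETURN value only: A sorts `positions` in place, B does not mutate it.

-- ===== PORT A =====
def part_one (positions : List Int) : Int :=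
  -- positions.sort() : loop below runs over the sorted list
  let ps := PySem.List.sorted positions (fun x => x) false
  let n : Int := ps.length
  let align_to : Int :=
    if PySem.Int.mod n 2 = 1 then
      -- int((len-1)/2): exact on these nonnegative even dividends, = floor division
      PySem.List.pyGetD ps (PySem.Int.floordiv (n - 1) 2) 0
    else
      let med_high := PySem.List.pyGetD ps (PySem.Int.floordiv n 2) 0
      let med_low := PySem.List.pyGetD ps (PySem.Int.floordiv n 2 - 1) 0
      if med_low - PySem.List.pyGetD ps 0 0 > PySem.List.pyGetD ps (n - 1) 0 - med_high
      then med_low else med_high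
  ps.foldl (fun fuel pos => fuel + |align_to - pos|) 0

-- ===== PORT B =====
def part_one_alt (positions : List Int) : Int :=
  let s := PySem.List.sorted positions (fun x => x) false
  let n : Int := s.length
  (PySem.List.pyRange 0 (PySem.Int.floordiv n 2) 1).foldl
    (fun acc i => acc + (PySem.List.pyGetD s (n - 1 - i) 0 - PySem.List.pyGetD s i 0)) 0

-- ===== PRECONDITION & SPEC =====
-- A subscripts the sorted list, so it raises IndexError exactly on the empty list.
def Pre_part_one (positions : List Int) : Prop := positions ≠ []
instance (positions : List Int) : Decidable (Pre_part_one positions) := by unfold Pre_part_one; infer_instance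
def pvWitness_part_one : List Int := [1, 2, 3, 10]

def Spec_part_one (positions : List Int) (out : Int) : Prop := out = part_one_alt positions
instance (positions : List Int) (out : Int) : Decidable (Spec_part_one positions out) := by unfold Spec_part_one; infer_instance

-- ===== CLAIM (what is proved, stated in full; the proofs are below) =====
def Claim_equal_part_one : Prop := ∀ (positions : List Int), Dom_part_one positions → Pre_part_one positions → Spec_part_one positions (part_one positions)

-- ===== LEMMAS AND PROOFS =====

/-- In a `≤`-sorted list, `getD` (default 0) is monotone on in-range indices. -/
lemma getD_mono_of_pairwise (s : List Int) (hs : List.Pairwise (· ≤ ·) s)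
    (i j : Nat) (hij : i ≤ j) (hj : j < s.length) :
    s.getD i 0 ≤ s.getD j 0 := by
  rcases Nat.lt_or_ge i j with h | h
  · rw [List.getD_eq_getElem s 0 (lt_of_le_of_lt hij hj), List.getD_eq_getElem s 0 hj]
    exact List.pairwise_iff_getElem.mp hs i j _ _ h
  · have : i = j := le_antisymm hij h
    simp [this]

/-- Pairing identity: for a sorted list `s` and any `m` between the lower and
upper median elements, the total L1 distance to `m` equals the sum of the gaps
between the outer pairs. -/
lemma pairing_identity : ∀ (N : Nat) (s : List Int), s.length = N →
    List.Pairwise (· ≤ ·) s → ∀ m : Int,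
    s.getD ((s.length - 1) / 2) 0 ≤ m → m ≤ s.getD (s.length / 2) 0 →
    (s.map (fun x => |m - x|)).sum
      = ((List.range (s.length / 2)).map
          (fun i => s.getD (s.length - 1 - i) 0 - s.getD i 0)).sum := by
  intro N
  induction N using Nat.strong_induction_on with
  | _ N ih =>
    intro s hN hs m h1 h2
    match s, hN with
    | [], _ => simp
    | a :: t, hN =>
      cases t with
      | nil =>
        -- singleton: m is squeezed to a, both sides are 0
        have e1 : ([a].length - 1) / 2 = 0 := by norm_num
        have e2 : [a].length / 2 = 0 := by norm_num
        rw [e1, List.getD_cons_zero] at h1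
        rw [e2, List.getD_cons_zero] at h2
        have hma : m = a := le_antisymm h2 h1
        subst hma
        simp
      | cons x xs =>
      have ht : (x :: xs : List Int) ≠ [] := by simp
      -- decompose s = a :: u ++ [b]
      obtain ⟨u, b, heq⟩ : ∃ u b, x :: xs = u ++ [b] :=
        ⟨(x :: xs).dropLast, (x :: xs).getLast ht, (List.dropLast_append_getLast ht).symm⟩
      rw [heq] at hN hs h1 h2 ⊢
      set s := a :: (u ++ [b]) with hsdef
      have hlen : s.length = u.length + 2 := by simp [s]
      have hul : u.length + 2 = N := by rw [← hlen, hN]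
      -- order facts
      have hpw_tail : List.Pairwise (· ≤ ·) (u ++ [b]) := hs.of_cons
      have hpw_u : List.Pairwise (· ≤ ·) u :=
        hpw_tail.sublist (List.sublist_append_left u [b])
      have hub : ∀ x ∈ u, x ≤ b := by
        intro x hx
        have := (List.pairwise_append.mp hpw_tail).2.2
        simpa using this x hx
      -- getD of s at inner index j+1 (j < u.length) is u's
      have hgetD_inner : ∀ j, j < u.length → s.getD (j + 1) 0 = u.getD j 0 := by
        intro j hj
        show (u ++ [b]).getD j 0 = u.getD j 0
        rw [List.getD_eq_getElem _ 0 (by simp; omega), List.getD_eq_getElem u 0 hj]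
        exact List.getElem_append_left hj
      have hgetD_last : s.getD (u.length + 1) 0 = b := by
        show (u ++ [b]).getD u.length 0 = b
        rw [List.getD_eq_getElem _ 0 (by simp)]
        simp
      -- a ≤ m ≤ b
      have hmono := getD_mono_of_pairwise s hs
      have hs0 : s.getD 0 0 = a := rfl
      have ham : a ≤ m := by
        have := hmono 0 ((s.length - 1) / 2) (Nat.zero_le _) (by omega)
        rw [hs0] at this; exact le_trans this h1
      have hmb : m ≤ b := by
        have := hmono (s.length / 2) (s.length - 1) (by omega) (by omega)
        have hlast : s.getD (s.length - 1) 0 = b := by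
          rw [hlen]; simpa using hgetD_last
        rw [hlast] at this; exact le_trans h2 this
      -- LHS peel
      have hLHS : (s.map (fun x => |m - x|)).sum
          = (b - a) + (u.map (fun x => |m - x|)).sum := by
        simp only [s, List.map_cons, List.map_append, List.sum_cons, List.sum_append,
          List.map_cons, List.sum_cons, List.map_nil, List.sum_nil]
        have h1' : |m - a| = m - a := abs_of_nonneg (by omega)
        have h2' : |m - b| = b - m := by rw [abs_sub_comm]; exact abs_of_nonneg (by omega)
        rw [h1', h2']; ring
      -- RHS peel
      have hhalf : s.length / 2 = u.length / 2 + 1 := by omega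
      have hRHS : ((List.range (s.length / 2)).map
            (fun i => s.getD (s.length - 1 - i) 0 - s.getD i 0)).sum
          = (b - a) + ((List.range (u.length / 2)).map
            (fun i => u.getD (u.length - 1 - i) 0 - u.getD i 0)).sum := by
        rw [hhalf, List.range_succ_eq_map]
        simp only [List.map_cons, List.sum_cons, List.map_map]
        have hterm0 : s.getD (s.length - 1 - 0) 0 - s.getD 0 0 = b - a := by
          rw [hs0, hlen]
          simpa using hgetD_last
        rw [hterm0]
        congr 1
        apply congrArg
        apply List.map_congr_left
        intro i hi
        have hi' : i < u.length / 2 := List.mem_range.mp hi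
        simp only [Function.comp]
        have e1 : s.length - 1 - Nat.succ i = (u.length - 1 - i) + 1 := by omega
        have e2 : s.getD (Nat.succ i) 0 = u.getD i 0 := hgetD_inner i (by omega)
        rw [e1, hgetD_inner _ (by omega), e2]
      rw [hLHS, hRHS]
      congr 1
      -- apply ih to u
      rcases Nat.eq_zero_or_pos u.length with hu0 | hu1
      · have : u = [] := List.eq_nil_of_length_eq_zero hu0
        subst this; simp
      · apply ih u.length (by omega) u rfl hpw_u m
        · have e : s.getD ((u.length - 1) / 2 + 1) 0 = u.getD ((u.length - 1) / 2) 0 :=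
            hgetD_inner _ (by omega)
          have hidx : (s.length - 1) / 2 = (u.length - 1) / 2 + 1 := by omega
          rw [hidx, e] at h1; exact h1
        · have e : s.getD (u.length / 2 + 1) 0 = u.getD (u.length / 2) 0 :=
            hgetD_inner _ (by omega)
          have hidx : s.length / 2 = u.length / 2 + 1 := by omega
          rw [hidx, e] at h2; exact h2

-- ===== VERDICT (by name: the statement is the Claim_ definition above) =====
theorem part_one_spec : Claim_equal_part_one := by
  intro positions _hdom hpre
  unfold Spec_part_one part_one part_one_alt
  set s := PySem.List.sorted positions (fun x => x) false with hsdef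
  have hpw : List.Pairwise (· ≤ ·) s := PySem.List.sorted_pairwise positions (fun x => x)
  have hpos : 1 ≤ s.length := by
    rw [hsdef, PySem.List.length_sorted]
    cases positions with
    | nil => exact absurd rfl hpre
    | cons a t => simp
  set L := s.length with hL
  -- cast cleanup for the indices
  have hsub1 : ((L : Int) - 1) = ((L - 1 : Nat) : Int) := by omega
  have hfd1 : PySem.Int.floordiv ((L : Int) - 1) 2 = (((L - 1) / 2 : Nat) : Int) := by
    rw [hsub1]; exact_mod_cast PySem.Int.floordiv_natCast (L - 1) 2
  have hfd2 : PySem.Int.floordiv (L : Int) 2 = ((L / 2 : Nat) : Int) := by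
    exact_mod_cast PySem.Int.floordiv_natCast L 2
  have hmod : PySem.Int.mod (L : Int) 2 = ((L % 2 : Nat) : Int) := by
    exact_mod_cast PySem.Int.mod_natCast L 2
  -- the B side as a plain sum over List.range (L / 2)
  have hB : (PySem.List.pyRange 0 (PySem.Int.floordiv (L : Int) 2) 1).foldl
      (fun acc i => acc + (PySem.List.pyGetD s ((L : Int) - 1 - i) 0 - PySem.List.pyGetD s i 0)) 0
      = ((List.range (L / 2)).map
          (fun i => s.getD (L - 1 - i) 0 - s.getD i 0)).sum := by
    rw [hfd2, PySem.List.pyRange_zero_nat, PySem.List.foldl_add]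
    simp only [List.map_map, zero_add]
    apply congrArg
    apply List.map_congr_left
    intro i hi
    have hi' : i < L / 2 := List.mem_range.mp hi
    simp only [Function.comp]
    have e1 : ((L : Int) - 1 - (i : Int)) = ((L - 1 - i : Nat) : Int) := by omega
    rw [e1, PySem.List.pyGetD_natCast, PySem.List.pyGetD_natCast]
  rw [hB, PySem.List.foldl_add]
  simp only [zero_add]
  -- the chosen alignment lies between the two medians
  set align : Int :=
    (if PySem.Int.mod (L : Int) 2 = 1 then
      PySem.List.pyGetD s (PySem.Int.floordiv ((L : Int) - 1) 2) 0
    else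
      let med_high := PySem.List.pyGetD s (PySem.Int.floordiv (L : Int) 2) 0
      let med_low := PySem.List.pyGetD s (PySem.Int.floordiv (L : Int) 2 - 1) 0
      if med_low - PySem.List.pyGetD s 0 0 > PySem.List.pyGetD s ((L : Int) - 1) 0 - med_high
      then med_low else med_high) with halign
  have hbounds : s.getD ((L - 1) / 2) 0 ≤ align ∧ align ≤ s.getD (L / 2) 0 := by
    have hmonoL := getD_mono_of_pairwise s hpw
    rw [halign]
    by_cases hodd : PySem.Int.mod (L : Int) 2 = 1
    · -- odd length: align is the exact middle, and (L-1)/2 = L/2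
      rw [if_pos hodd, hfd1, PySem.List.pyGetD_natCast]
      have hodd' : L % 2 = 1 := by rw [hmod] at hodd; exact_mod_cast hodd
      have e : (L - 1) / 2 = L / 2 := by omega
      exact ⟨le_refl _, le_of_eq (by rw [e])⟩
    · rw [if_neg hodd]
      have heven : L % 2 = 0 := by
        rw [hmod] at hodd
        have h2' : L % 2 ≠ 1 := fun h => hodd (by exact_mod_cast h)
        omega
      have e1 : PySem.Int.floordiv (L : Int) 2 - 1 = ((L / 2 - 1 : Nat) : Int) := by
        rw [hfd2]; omega
      have eidx : L / 2 - 1 = (L - 1) / 2 := by omega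
      dsimp only
      split_ifs with hcmp
      · -- med_low chosen: it sits at index L/2 - 1 = (L-1)/2
        rw [e1, PySem.List.pyGetD_natCast, eidx]
        exact ⟨le_refl _, hmonoL _ _ (by omega) (by omega)⟩
      · -- med_high chosen: it sits at index L/2
        rw [hfd2, PySem.List.pyGetD_natCast]
        exact ⟨hmonoL _ _ (by omega) (by omega), le_refl _⟩
  exact pairing_identity L s rfl hpw align hbounds.1 hbounds.2
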